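-- pv_equiv track=rewrite | github.com/297118506/python | app.py | format_videos
-- ===== SOURCE A (Python) =====
-- def format_videos(video_links):
--     """根据视频链接数量生成HTML5 video标签内容"""
--     if not video_links:
--         return ""
--     table_rows = []
--     for i in range(0, len(video_links), 2):
--         left_td = f'<td style="background:#fff;border-radius:8px;padding:8px;border:1px solid #eee;width:50%;vertical-align:top;"><video src=\"{video_links[i]}\" controls=\"true\" style=\"width:100%;height:auto;max-width:100%;\"></video></td>'
--         if i + 1 < len(video_links):
--             right_td = f'<td style="background:#fff;border-radius:8px;padding:8px;border:1px solid #eee;width:50%;vertical-align:top;"><video src=\"{video_links[i+1]}\" controls=\"true\" style=\"width:100%;height:auto;max-width:100%;\"></video></td>'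
--             table_rows.append(f"<tr>{left_td}{right_td}</tr>")
--         else:
--             table_rows.append(f"<tr>{left_td}<td></td></tr>")
--     return '<table style="border-spacing:16px 16px;width:100%;">\n' + '\n'.join(table_rows) + '\n</table>'
-- ===== SOURCE B (Python) =====
-- def format_videos(video_links):
--     """根据视频链接数量生成HTML5 video标签内容"""
--     if not video_links:
--         return ""
--     td = '<td style="background:#fff;border-radius:8px;padding:8px;border:1px solid #eee;width:50%;vertical-align:top;"><video src="{}" controls="true" style="width:100%;height:auto;max-width:100%;"></video></td>'
--     cells = [td.format(link) for link in video_links]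
--     if len(cells) % 2 == 1:
--         cells.append('<td></td>')
--     it = iter(cells)
--     rows = ['<tr>{}{}</tr>'.format(a, b) for a, b in zip(it, it)]
--     return '<table style="border-spacing:16px 16px;width:100%;">\n' + '\n'.join(rows) + '\n</table>'
-- ===== Notes on version B (the rewrite author's own statement) =====
-- stated objective: alternative
-- what changed: B first maps every link to its styled <td> cell, pads the cell list with the plain '<td></td>' filler when its length is odd, and then chunks the cells two-at-a-time into <tr> rows (zip over one shared iterator), replacing A's index-stepped range(0,len,2) loop with its in-body parity branch.
import Mathlib
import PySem

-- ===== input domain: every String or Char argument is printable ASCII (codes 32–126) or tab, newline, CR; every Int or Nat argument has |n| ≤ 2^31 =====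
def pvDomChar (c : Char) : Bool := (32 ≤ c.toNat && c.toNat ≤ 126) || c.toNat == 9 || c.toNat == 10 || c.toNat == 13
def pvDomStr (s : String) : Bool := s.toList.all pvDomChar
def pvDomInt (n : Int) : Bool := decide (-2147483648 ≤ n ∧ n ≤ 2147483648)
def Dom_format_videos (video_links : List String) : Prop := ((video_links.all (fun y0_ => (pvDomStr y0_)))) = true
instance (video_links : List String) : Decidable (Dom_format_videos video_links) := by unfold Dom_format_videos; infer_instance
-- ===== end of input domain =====

-- B builds the styled <td> cells first, pads with '<td></td>' on odd count, then chunks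
-- the cells two-at-a-time into rows, instead of A's index-stepped loop; objective: alternative.

-- ===== PORT A =====
-- the styled td cell both Pythons build from the same template (A's f-string, B's .format);
-- in port A the index passed to pyGetD is always in range, so the default "" is never used
def pvTdA (link : String) : String :=
  "<td style=\"background:#fff;border-radius:8px;padding:8px;border:1px solid #eee;width:50%;vertical-align:top;\"><video src=\"" ++ link ++ "\" controls=\"true\" style=\"width:100%;height:auto;max-width:100%;\"></video></td>"

def format_videos (video_links : List String) : String :=
  if video_links = [] then ""
  else
    let table_rows :=
      (PySem.List.pyRange 0 (video_links.length : Int) 2).foldl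
        (fun rows i =>
          let left_td := pvTdA (PySem.List.pyGetD video_links i "")
          if i + 1 < (video_links.length : Int) then
            let right_td := pvTdA (PySem.List.pyGetD video_links (i + 1) "")
            rows ++ ["<tr>" ++ left_td ++ right_td ++ "</tr>"]
          else
            rows ++ ["<tr>" ++ left_td ++ "<td></td></tr>"]) []
    "<table style=\"border-spacing:16px 16px;width:100%;\">\n" ++ PySem.Str.join "\n" table_rows ++ "\n</table>"

-- ===== PORT B =====
-- 'if len(cells) % 2 == 1: cells.append('<td></td>')'
def pvPadCells (cells : List String) : List String :=
  if cells.length % 2 == 1 then cells ++ ["<td></td>"] else cells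

-- 'zip(it, it)' over one shared iterator: consume the cells two at a time
def pvPairRows : List String → List String
  | a :: b :: rest => ("<tr>" ++ a ++ b ++ "</tr>") :: pvPairRows rest
  | _ => []

def format_videos_alt (video_links : List String) : String :=
  if video_links = [] then ""
  else
    let cells := video_links.map pvTdA
    let rows := pvPairRows (pvPadCells cells)
    "<table style=\"border-spacing:16px 16px;width:100%;\">\n" ++ PySem.Str.join "\n" rows ++ "\n</table>"

-- ===== PRECONDITION & SPEC =====
def Spec_format_videos (video_links : List String) (out : String) : Prop := out = format_videos_alt video_links
instance (video_links : List String) (out : String) : Decidable (Spec_format_videos video_links out) := by unfold Spec_format_videos; infer_instance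

-- ===== CLAIM (what is proved, stated in full; the proofs are below) =====
def Claim_equal_format_videos : Prop := ∀ (video_links : List String), Dom_format_videos video_links → Spec_format_videos video_links (format_videos video_links)

-- ===== LEMMAS AND PROOFS =====

-- A's row for row index k, stated over Nat indices
def pvRowA (links : List String) (k : Nat) : String :=
  if 2 * k + 1 < links.length then
    "<tr>" ++ pvTdA (links.getD (2 * k) "") ++ pvTdA (links.getD (2 * k + 1) "") ++ "</tr>"
  else
    "<tr>" ++ pvTdA (links.getD (2 * k) "") ++ "<td></td></tr>"

lemma pv_range2 (n : Nat) :
    PySem.List.pyRange 0 (n : Int) 2 =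
      (List.range ((n + 1) / 2)).map (fun k => ((2 * k : Nat) : Int)) := by
  rw [PySem.List.pyRange_of_pos 0 (n : Int) (by norm_num)]
  have hc : (if (0 : Int) < (n : Int) then (((n : Int) - 0 + 2 - 1) / 2).toNat else 0) = (n + 1) / 2 := by
    split_ifs with h
    · omega
    · omega
  rw [hc]
  apply List.map_congr_left
  intro k _
  push_cast
  ring

lemma pv_foldl_rows (links : List String) :
    (PySem.List.pyRange 0 (links.length : Int) 2).foldl
        (fun rows i =>
          let left_td := pvTdA (PySem.List.pyGetD links i "")
          if i + 1 < (links.length : Int) then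
            let right_td := pvTdA (PySem.List.pyGetD links (i + 1) "")
            rows ++ ["<tr>" ++ left_td ++ right_td ++ "</tr>"]
          else
            rows ++ ["<tr>" ++ left_td ++ "<td></td></tr>"]) []
      = (List.range ((links.length + 1) / 2)).map (pvRowA links) := by
  rw [pv_range2]
  rw [List.foldl_map]
  have h : ∀ (acc : List String),
      (List.range ((links.length + 1) / 2)).foldl
        (fun rows k =>
          let i : Int := ((2 * k : Nat) : Int)
          let left_td := pvTdA (PySem.List.pyGetD links i "")
          if i + 1 < (links.length : Int) then
            let right_td := pvTdA (PySem.List.pyGetD links (i + 1) "")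
            rows ++ ["<tr>" ++ left_td ++ right_td ++ "</tr>"]
          else
            rows ++ ["<tr>" ++ left_td ++ "<td></td></tr>"]) acc
      = acc ++ (List.range ((links.length + 1) / 2)).map (pvRowA links) := by
    intro acc
    rw [show (fun rows k =>
          let i : Int := ((2 * k : Nat) : Int)
          let left_td := pvTdA (PySem.List.pyGetD links i "")
          if i + 1 < (links.length : Int) then
            let right_td := pvTdA (PySem.List.pyGetD links (i + 1) "")
            rows ++ ["<tr>" ++ left_td ++ right_td ++ "</tr>"]
          else
            rows ++ ["<tr>" ++ left_td ++ "<td></td></tr>"])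
        = (fun (rows : List String) (k : Nat) => rows ++ [pvRowA links k]) from ?_]
    · exact PySem.List.foldl_append_singleton_eq_map (pvRowA links) _ acc
    · funext rows k
      simp only [pvRowA]
      have h1 : ((2 * k : Nat) : Int) + 1 = ((2 * k + 1 : Nat) : Int) := by push_cast; ring
      have h2 : (((2 * k : Nat) : Int) + 1 < (links.length : Int)) ↔ (2 * k + 1 < links.length) := by
        rw [h1]; exact_mod_cast Iff.rfl
      by_cases hlt : 2 * k + 1 < links.length
      · rw [if_pos (h2.mpr hlt), if_pos hlt, PySem.List.pyGetD_natCast, h1, PySem.List.pyGetD_natCast]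
      · rw [if_neg (fun hh => hlt (h2.mp hh)), if_neg hlt, PySem.List.pyGetD_natCast]
  simpa using h []

lemma pv_append_td_tr (x : String) :
    "<tr>" ++ x ++ "<td></td></tr>" = "<tr>" ++ x ++ "<td></td>" ++ "</tr>" := by
  have h : ("<td></td>" : String) ++ "</tr>" = "<td></td></tr>" := rfl
  conv_rhs => rw [String.append_assoc]
  rw [h]

lemma pv_rows_eq (links : List String) :
    (List.range ((links.length + 1) / 2)).map (pvRowA links)
      = pvPairRows (pvPadCells (links.map pvTdA)) := by
  induction links using pvPairRows.induct with
  | case1 a b rest ih =>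
    have hlen : (a :: b :: rest).length = rest.length + 2 := by simp
    have hm : ((a :: b :: rest).length + 1) / 2 = (rest.length + 1) / 2 + 1 := by
      rw [hlen]; omega
    rw [hm, List.range_succ_eq_map, List.map_cons, List.map_map]
    have hpad : pvPadCells ((a :: b :: rest).map pvTdA)
        = pvTdA a :: pvTdA b :: pvPadCells (rest.map pvTdA) := by
      simp only [pvPadCells, List.map_cons, List.length_cons, List.length_map]
      have hp : (rest.length + 1 + 1) % 2 = rest.length % 2 := by omega
      rw [hp]
      split_ifs <;> rfl
    rw [hpad, pvPairRows]
    congr 1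
    rw [← ih]
    apply List.map_congr_left
    intro k _
    show pvRowA (a :: b :: rest) (k + 1) = pvRowA rest k
    simp only [pvRowA]
    have e1 : 2 * (k + 1) = 2 * k + 2 := by ring
    have e2 : (a :: b :: rest).getD (2 * (k + 1)) "" = rest.getD (2 * k) "" := by
      rw [e1]; rfl
    have e3 : (a :: b :: rest).getD (2 * (k + 1) + 1) "" = rest.getD (2 * k + 1) "" := by
      rw [e1]; rfl
    have e4 : (2 * (k + 1) + 1 < (a :: b :: rest).length) ↔ (2 * k + 1 < rest.length) := by
      simp [hlen]; omega
    by_cases hlt : 2 * k + 1 < rest.length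
    · rw [if_pos (e4.mpr hlt), if_pos hlt, e2, e3]
    · rw [if_neg (fun hh => hlt (e4.mp hh)), if_neg hlt, e2]
  | case2 x hx =>
    -- the catch-all case: x is [] or [a]
    match x, hx with
    | a :: b :: rest, hx => exact (hx a b rest rfl).elim
    | [], _ =>
        simp [pvPadCells, pvPairRows]
    | [a], _ =>
        have h1 : (([a] : List String).length + 1) / 2 = 1 := by simp
        rw [h1, List.range_one, List.map_cons, List.map_nil]
        have hpad1 : pvPadCells ([a].map pvTdA) = [pvTdA a, "<td></td>"] := by
          simp [pvPadCells]
        rw [hpad1]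
        have hpair : pvPairRows [pvTdA a, "<td></td>"] = ["<tr>" ++ pvTdA a ++ "<td></td>" ++ "</tr>"] := by
          simp [pvPairRows]
        rw [hpair]
        simp only [pvRowA, List.length_cons, List.length_nil]
        rw [if_neg (by omega)]
        have hg : ([a] : List String).getD (2 * 0) "" = a := rfl
        rw [hg, pv_append_td_tr]

lemma pv_main (links : List String) : format_videos links = format_videos_alt links := by
  unfold format_videos format_videos_alt
  by_cases h : links = []
  · rw [if_pos h, if_pos h]
  · rw [if_neg h, if_neg h]
    rw [pv_foldl_rows, pv_rows_eq]

-- ===== VERDICT (by name: the statement is the Claim_ definition above) =====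
theorem format_videos_spec : Claim_equal_format_videos := by
  intro links _
  unfold Spec_format_videos
  exact pv_main links
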